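-- pv_equiv track=rewrite | github.com/stianoverby/scripts | match.py | pretty_output_participants
-- ===== SOURCE A (Python) =====
-- def pretty_output_participants(title, participants):
--     header_women = "   |Kvinner|\n"
--     header_men = "\n   |Menn|\n"
--     header_n_participants = (
--         "\n   Participants in category : " + str(len(participants)) + "\n"
--     )
--
--     output = title
--     output += header_women
--     for participant in participants:
--         if participant[3] == "Kvinne":
--             output += "   " + str(participant) + "\n"
--
--     output += header_men
--     for participant in participants:
--         if participant[3] == "Mann":
--             output += "   " + str(participant) + "\n"
--     output += header_n_participants
--     return output
-- ===== SOURCE B (Python) =====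
-- def pretty_output_participants(title, participants):
--     women = ""
--     men = ""
--     for p in participants:
--         line = "   " + str(p) + "\n"
--         if p[3] == "Kvinne":
--             women += line
--         elif p[3] == "Mann":
--             men += line
--     return (
--         title
--         + "   |Kvinner|\n"
--         + women
--         + "\n   |Menn|\n"
--         + men
--         + "\n   Participants in category : "
--         + str(len(participants))
--         + "\n"
--     )
-- ===== Notes on version B (the rewrite author's own statement) =====
-- stated objective: simpler
-- what changed: One pass over participants maintaining two string accumulators (women/men) instead of A's two sequential filtering scans, then a single concatenation of the result.
import Mathlib
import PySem

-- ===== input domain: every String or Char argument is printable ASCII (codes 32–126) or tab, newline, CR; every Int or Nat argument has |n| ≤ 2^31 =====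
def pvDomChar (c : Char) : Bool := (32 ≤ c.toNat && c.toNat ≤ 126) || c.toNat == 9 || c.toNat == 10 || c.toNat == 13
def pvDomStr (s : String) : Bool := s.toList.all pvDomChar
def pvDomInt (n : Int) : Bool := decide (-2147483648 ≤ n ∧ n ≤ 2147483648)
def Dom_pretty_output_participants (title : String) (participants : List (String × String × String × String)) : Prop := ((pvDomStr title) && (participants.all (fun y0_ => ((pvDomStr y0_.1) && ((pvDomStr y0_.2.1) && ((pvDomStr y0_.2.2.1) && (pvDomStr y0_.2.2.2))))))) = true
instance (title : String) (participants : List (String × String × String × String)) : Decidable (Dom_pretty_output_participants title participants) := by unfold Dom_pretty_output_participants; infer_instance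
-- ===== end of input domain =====

-- B builds both gender sections in ONE pass with two string accumulators instead of A's two
-- sequential filtering scans; objective: simpler. Return values agree on all of Dom.

-- Shared hand port of Python's str() on a 4-tuple of strings (repr of each element):
-- exact on the Dom alphabet (printable ASCII plus tab/newline/CR), where repr escapes
-- backslash, the chosen quote, and \t \n \r, and picks double quotes iff the string
-- contains a single quote and no double quote.
def pyEscChar (q : Char) (c : Char) : List Char :=
  if c = '\\' then ['\\', '\\']
  else if c = q then ['\\', q]
  else if c = '\t' then ['\\', 't']
  else if c = '\n' then ['\\', 'n']
  else if c = '\r' then ['\\', 'r']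
  else [c]

def pyReprStr (s : String) : String :=
  let cs := s.toList
  let q : Char := if cs.contains '\'' && !cs.contains '"' then '"' else '\''
  String.ofList (q :: (cs.flatMap (pyEscChar q) ++ [q]))

def pyReprTuple4 (p : String × String × String × String) : String :=
  "(" ++ pyReprStr p.1 ++ ", " ++ pyReprStr p.2.1 ++ ", " ++ pyReprStr p.2.2.1 ++ ", " ++ pyReprStr p.2.2.2 ++ ")"

-- ===== PORT A =====
def pretty_output_participants (title : String) (participants : List (String × String × String × String)) : String :=
  let header_women := "   |Kvinner|\n"
  let header_men := "\n   |Menn|\n"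
  let header_n_participants := "\n   Participants in category : " ++ PySem.Int.toStr (participants.length : Int) ++ "\n"
  let output := title
  let output := output ++ header_women
  let output := participants.foldl (fun acc p =>
    if p.2.2.2 == "Kvinne" then acc ++ ("   " ++ pyReprTuple4 p ++ "\n") else acc) output
  let output := output ++ header_men
  let output := participants.foldl (fun acc p =>
    if p.2.2.2 == "Mann" then acc ++ ("   " ++ pyReprTuple4 p ++ "\n") else acc) output
  output ++ header_n_participants

-- ===== PORT B =====
def pretty_output_participants_alt (title : String) (participants : List (String × String × String × String)) : String :=
  let acc := participants.foldl (fun (acc : String × String) p =>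
      let line := "   " ++ pyReprTuple4 p ++ "\n"
      if p.2.2.2 == "Kvinne" then (acc.1 ++ line, acc.2)
      else if p.2.2.2 == "Mann" then (acc.1, acc.2 ++ line)
      else acc) ("", "")
  title ++ "   |Kvinner|\n" ++ acc.1 ++ "\n   |Menn|\n" ++ acc.2
    ++ "\n   Participants in category : " ++ PySem.Int.toStr (participants.length : Int) ++ "\n"

-- ===== PRECONDITION & SPEC =====
def Spec_pretty_output_participants (title : String) (participants : List (String × String × String × String)) (out : String) : Prop := out = pretty_output_participants_alt title participants
instance (title : String) (participants : List (String × String × String × String)) (out : String) : Decidable (Spec_pretty_output_participants title participants out) := by unfold Spec_pretty_output_participants; infer_instance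

-- ===== CLAIM (what is proved, stated in full; the proofs are below) =====
def Claim_equal_pretty_output_participants : Prop := ∀ (title : String) (participants : List (String × String × String × String)), Dom_pretty_output_participants title participants → Spec_pretty_output_participants title participants (pretty_output_participants title participants)

-- ===== LEMMAS AND PROOFS =====

-- first component of B's pair fold = A's women fold
theorem pair_fold_fst (ps : List (String × String × String × String)) (w m : String) :
    (ps.foldl (fun (acc : String × String) p =>
      if p.2.2.2 = "Kvinne" then (acc.1 ++ ("   " ++ pyReprTuple4 p ++ "\n"), acc.2)
      else if p.2.2.2 = "Mann" then (acc.1, acc.2 ++ ("   " ++ pyReprTuple4 p ++ "\n"))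
      else acc) (w, m)).1
    = ps.foldl (fun acc p =>
        if p.2.2.2 = "Kvinne" then acc ++ ("   " ++ pyReprTuple4 p ++ "\n") else acc) w := by
  induction ps generalizing w m with
  | nil => rfl
  | cons p ps ih =>
    simp only [List.foldl_cons]
    by_cases h1 : p.2.2.2 = "Kvinne"
    · simp only [if_pos h1]; exact ih _ _
    · simp only [if_neg h1]
      by_cases h2 : p.2.2.2 = "Mann"
      · simp only [if_pos h2]; exact ih _ _
      · simp only [if_neg h2]; exact ih _ _

-- second component of B's pair fold = A's men fold
theorem pair_fold_snd (ps : List (String × String × String × String)) (w m : String) :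
    (ps.foldl (fun (acc : String × String) p =>
      if p.2.2.2 = "Kvinne" then (acc.1 ++ ("   " ++ pyReprTuple4 p ++ "\n"), acc.2)
      else if p.2.2.2 = "Mann" then (acc.1, acc.2 ++ ("   " ++ pyReprTuple4 p ++ "\n"))
      else acc) (w, m)).2
    = ps.foldl (fun acc p =>
        if p.2.2.2 = "Mann" then acc ++ ("   " ++ pyReprTuple4 p ++ "\n") else acc) m := by
  induction ps generalizing w m with
  | nil => rfl
  | cons p ps ih =>
    simp only [List.foldl_cons]
    by_cases h1 : p.2.2.2 = "Kvinne"
    · have h2 : ¬ p.2.2.2 = "Mann" := by rw [h1]; decide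
      simp only [if_pos h1, if_neg h2]; exact ih _ _
    · simp only [if_neg h1]
      by_cases h2 : p.2.2.2 = "Mann"
      · simp only [if_pos h2]; exact ih _ _
      · simp only [if_neg h2]; exact ih _ _

-- a conditional appending fold peels its initial prefix
theorem fold_shift (c : (String × String × String × String) → Prop) [DecidablePred c]
    (ps : List (String × String × String × String)) (pre : String) :
    ps.foldl (fun acc p => if c p then acc ++ ("   " ++ pyReprTuple4 p ++ "\n") else acc) pre
    = pre ++ ps.foldl (fun acc p => if c p then acc ++ ("   " ++ pyReprTuple4 p ++ "\n") else acc) "" := by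
  induction ps generalizing pre with
  | nil => simp
  | cons p ps ih =>
    simp only [List.foldl_cons]
    by_cases h : c p
    · simp only [if_pos h]
      rw [ih (pre ++ _), ih (("" : String) ++ _)]
      simp [String.append_assoc]
    · simp only [if_neg h]
      exact ih pre

-- ===== VERDICT (by name: the statement is the Claim_ definition above) =====
theorem pretty_output_participants_spec : Claim_equal_pretty_output_participants := by
  intro title ps _
  unfold Spec_pretty_output_participants pretty_output_participants pretty_output_participants_alt
  simp only [beq_iff_eq]
  rw [pair_fold_fst, pair_fold_snd,
      fold_shift (fun p => p.2.2.2 = "Kvinne"), fold_shift (fun p => p.2.2.2 = "Mann")]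
  simp [String.append_assoc]
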